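-- pv_equiv track=rewrite | github.com/Nocotov77/py_gerda | 31_Возврат_из_глубины_функции_Отладка/3106_Лезвие_бритвы/main.py | blade
-- ===== SOURCE A (Python) =====
-- def blade(word):
--     result = [word]
--     if len(word) % 2 == 0:
--         while len(word) > 1:
--             word = word[:-1]
--             result.append(word)
--     else:
--         while len(word) > 1:
--             word = word[1:]
--             result.append(word)
--     return result
-- ===== SOURCE B (Python) =====
-- def blade(word):
--     # Build the answer back-to-front: grow each element from the previous one by a
--     # single character (append for even length, prepend for odd), then reverse once.
--     if not word:
--         return [word]
--     out = []
--     if len(word) % 2 == 0: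
--         cur = ""
--         for c in word:
--             cur += c
--             out.append(cur)
--     else:
--         cur = ""
--         for c in reversed(word):
--             cur = c + cur
--             out.append(cur)
--     out.reverse()
--     return out
-- ===== Notes on version B (the rewrite author's own statement) =====
-- stated objective: alternative
-- what changed: Instead of A's destructive trimming loops that repeatedly slice a shrinking copy of the word, B builds the result back-to-front: it grows each element from the previous one by a single character (appending left-to-right for even length, prepending right-to-left for odd) and reverses the accumulator once at the end; no slicing is performed.
import Mathlib
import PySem

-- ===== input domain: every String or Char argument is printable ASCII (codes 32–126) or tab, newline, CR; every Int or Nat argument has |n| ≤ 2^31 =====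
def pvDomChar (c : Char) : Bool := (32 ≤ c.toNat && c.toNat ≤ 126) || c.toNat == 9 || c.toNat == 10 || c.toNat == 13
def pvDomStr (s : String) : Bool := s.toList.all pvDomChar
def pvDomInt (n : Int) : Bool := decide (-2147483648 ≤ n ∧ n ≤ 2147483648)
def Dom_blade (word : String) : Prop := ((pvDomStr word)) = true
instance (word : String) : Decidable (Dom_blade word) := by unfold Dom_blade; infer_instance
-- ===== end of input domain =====

-- B builds the answer back-to-front, growing each element from the previous one by a
-- single character and reversing once, instead of A's destructive trimming loops
-- that repeatedly slice a shrinking copy of the word; same cost, no slicing.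

-- ===== PORT A =====
-- while len(word) > 1: word = word[:-1]; result.append(word)
def bladeEvenLoop (w : List Char) : List (List Char) :=
  if _h : w.length > 1 then
    let w' := w.dropLast
    w' :: bladeEvenLoop w'
  else []
termination_by w.length
decreasing_by
  simp [List.length_dropLast]; omega

-- while len(word) > 1: word = word[1:]; result.append(word)
def bladeOddLoop (w : List Char) : List (List Char) :=
  if w.length > 1 then
    let w' := w.tail
    w' :: bladeOddLoop w'
  else []
termination_by w.length
decreasing_by
  simp [List.length_tail]; omega

def blade (word : String) : List String :=
  let w := word.toList
  if w.length % 2 == 0 then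
    word :: (bladeEvenLoop w).map String.ofList
  else
    word :: (bladeOddLoop w).map String.ofList

-- ===== PORT B =====
-- for c in word: cur += c; out.append(cur)    (state = (cur, out))
def bladeGrowRight (p : List Char × List String) (c : Char) : List Char × List String :=
  let cur := p.1 ++ [c]
  (cur, p.2 ++ [String.ofList cur])

-- for c in reversed(word): cur = c + cur; out.append(cur)
def bladeGrowLeft (p : List Char × List String) (c : Char) : List Char × List String :=
  let cur := c :: p.1
  (cur, p.2 ++ [String.ofList cur])

def blade_alt (word : String) : List String :=
  let w := word.toList
  if w = [] then [word]
  else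
    let out :=
      if w.length % 2 == 0 then
        (w.foldl bladeGrowRight ([], [])).2
      else
        (w.reverse.foldl bladeGrowLeft ([], [])).2
    out.reverse

-- ===== PRECONDITION & SPEC =====
def Spec_blade (word : String) (out : List String) : Prop := out = blade_alt word
instance (word : String) (out : List String) : Decidable (Spec_blade word out) := by unfold Spec_blade; infer_instance

-- ===== CLAIM (what is proved, stated in full; the proofs are below) =====
def Claim_equal_blade : Prop := ∀ (word : String), Dom_blade word → Spec_blade word (blade word)

-- ===== LEMMAS AND PROOFS =====
theorem bladeEvenLoop_eq (w : List Char) :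
    bladeEvenLoop w = (List.range (w.length - 1)).map (fun j => w.take (w.length - (j + 1))) := by
  induction w using bladeEvenLoop.induct with
  | case1 w h w' ih =>
    rw [bladeEvenLoop, dif_pos h]
    show w' :: bladeEvenLoop w' = _
    have hn : w.length - 1 - 1 + 1 = w.length - 1 := by omega
    have hlen : w'.length = w.length - 1 := by simp [w', List.length_dropLast]
    rw [ih, ← hn, List.range_succ_eq_map]
    simp only [List.map_cons, List.map_map, hlen]
    congr 1
    · show w.dropLast = w.take (w.length - (0 + 1))
      simp [List.dropLast_eq_take]
    · apply List.map_congr_left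
      intro j hj
      have hj' : j < w.length - 1 - 1 := List.mem_range.mp hj
      show w'.take (w.length - 1 - (j + 1)) = w.take (w.length - (j + 1 + 1))
      have : w' = w.take (w.length - 1) := by simp [w', List.dropLast_eq_take]
      rw [this, List.take_take]
      congr 1
      omega
  | case2 w h =>
    rw [bladeEvenLoop, dif_neg h]
    have : w.length - 1 = 0 := by omega
    simp [this]

theorem bladeOddLoop_eq (w : List Char) :
    bladeOddLoop w = (List.range (w.length - 1)).map (fun j => w.drop (j + 1)) := by
  induction w using bladeOddLoop.induct with
  | case1 w h w' ih =>
    rw [bladeOddLoop, if_pos (by simpa using h)]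
    show w' :: bladeOddLoop w' = _
    have hlen : w'.length = w.length - 1 := by simp [w', List.length_tail]
    have hn : w.length - 1 - 1 + 1 = w.length - 1 := by omega
    rw [ih, ← hn, List.range_succ_eq_map]
    simp only [List.map_cons, List.map_map, hlen]
    congr 1
    · show w.tail = w.drop (0 + 1)
      simp [List.drop_one]
    · apply List.map_congr_left
      intro j hj
      show w'.drop (j + 1) = w.drop (j + 1 + 1)
      have hw' : w' = List.drop 1 w := by simp [w', List.drop_one]
      rw [hw', List.drop_drop, Nat.add_comm 1 (j + 1)]
  | case2 w h =>
    rw [bladeOddLoop, if_neg (by simpa using h)]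
    have : w.length - 1 = 0 := by omega
    simp [this]

-- reversing a map over range re-indexes i ↦ n-1-i
theorem rev_map_range {α : Type} (n : ℕ) (f : ℕ → α) :
    ((List.range n).map f).reverse = (List.range n).map (fun i => f (n - 1 - i)) := by
  apply List.ext_getElem
  · simp
  · intro i h1 h2
    simp only [List.getElem_reverse, List.getElem_map, List.getElem_range,
      List.length_map, List.length_range]

theorem growRight_spec (l : List Char) (cur : List Char) (out : List String) :
    l.foldl bladeGrowRight (cur, out) =
      (cur ++ l, out ++ (List.range l.length).map (fun i => String.ofList (cur ++ l.take (i + 1)))) := by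
  induction l generalizing cur out with
  | nil => simp
  | cons c l ih =>
    rw [List.foldl_cons]
    show (l.foldl bladeGrowRight (cur ++ [c], out ++ [String.ofList (cur ++ [c])])) = _
    rw [ih, Prod.mk.injEq]
    refine ⟨by simp, ?_⟩
    rw [List.append_assoc]
    congr 1
    rw [List.length_cons, List.range_succ_eq_map, List.map_cons, List.map_map]
    simp only [List.take_succ_cons, List.take_zero, List.singleton_append]
    congr 1
    apply List.map_congr_left
    intro j _
    simp [Function.comp, List.append_assoc]

theorem growLeft_spec (l : List Char) (cur : List Char) (out : List String) :
    l.foldl bladeGrowLeft (cur, out) =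
      (l.reverse ++ cur, out ++ (List.range l.length).map (fun i => String.ofList ((l.take (i + 1)).reverse ++ cur))) := by
  induction l generalizing cur out with
  | nil => simp
  | cons c l ih =>
    rw [List.foldl_cons]
    show (l.foldl bladeGrowLeft (c :: cur, out ++ [String.ofList (c :: cur)])) = _
    rw [ih, Prod.mk.injEq]
    refine ⟨by simp, ?_⟩
    rw [List.append_assoc]
    congr 1
    rw [List.length_cons, List.range_succ_eq_map, List.map_cons, List.map_map]
    simp only [List.take_succ_cons, List.take_zero, List.reverse_cons, List.reverse_nil,
      List.nil_append, List.singleton_append]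
    congr 1
    apply List.map_congr_left
    intro j _
    simp [Function.comp, List.append_assoc]

-- ===== VERDICT (by name: the statement is the Claim_ definition above) =====
theorem blade_spec : Claim_equal_blade := by
  intro word _
  unfold Spec_blade blade blade_alt
  simp only []
  set w := word.toList with hw
  have hword : String.ofList w = word := by rw [hw]; exact String.ofList_toList
  by_cases h0 : w = []
  · have h2 : (w.length % 2 == 0) = true := by rw [h0]; decide
    rw [if_pos h2, if_pos h0, h0]
    simp [bladeEvenLoop]
  · rw [if_neg h0]
    have hpos : 0 < w.length := List.length_pos_iff.mpr h0
    by_cases h : w.length % 2 == 0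
    · rw [if_pos h, if_pos h, growRight_spec]
      simp only [List.nil_append]
      rw [rev_map_range, bladeEvenLoop_eq, List.map_map]
      have hlen : w.length = (w.length - 1) + 1 := by omega
      conv_rhs => rw [hlen, List.range_succ_eq_map, List.map_cons, List.map_map]
      simp only [Nat.add_sub_cancel, Nat.sub_zero]
      congr 1
      · have h1 : w.length - 1 + 1 = w.length := by omega
        rw [h1, List.take_length, hword]
      · apply List.map_congr_left
        intro j hj
        have hj' : j < w.length - 1 := List.mem_range.mp hj
        simp only [Function.comp]
        congr 2
        omega
    · rw [if_neg h, if_neg h, growLeft_spec]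
      simp only [List.nil_append, List.append_nil, List.length_reverse]
      rw [rev_map_range, bladeOddLoop_eq, List.map_map]
      have htr : ∀ i, i < w.length →
          (w.reverse.take (w.length - 1 - i + 1)).reverse = w.drop i := by
        intro i hi
        rw [List.take_reverse, List.reverse_reverse]
        congr 1
        omega
      have hlen : w.length = (w.length - 1) + 1 := by omega
      conv_rhs => rw [hlen, List.range_succ_eq_map, List.map_cons, List.map_map]
      simp only [Nat.add_sub_cancel, Nat.sub_zero]
      congr 1
      · have h1 := htr 0 hpos
        simp only [Nat.sub_zero] at h1
        rw [h1, List.drop_zero, hword]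
      · apply List.map_congr_left
        intro j hj
        have hj' : j < w.length - 1 := List.mem_range.mp hj
        simp only [Function.comp]
        have h2 := htr (j + 1) (by omega)
        rw [h2]
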